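-- pv_equiv track=rewrite | github.com/jasperchan5/GobangBattle | gobang.py | posAdjustment
-- ===== SOURCE A (Python) =====
-- def posAdjustment(pos):
--     # Coord is what program sees
--     # Pos is what we sees
--     coord = [-1, -1]
--     for i in range(0, 15):
--         if pos[0] >= 100 + (30*i) - 15 and pos[0] < 100 + (30*i) +15:
--             pos[0] = 100 + (30*i)
--             coord[0] = i
--         if pos[1] >= 100 + (30*i) -15 and pos[1] < 100 + (30*i) +15:
--             pos[1] = 100 + (30*i)
--             coord[1] = i
--     return coord, pos
-- ===== SOURCE B (Python) =====
-- def posAdjustment(pos):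
--     # Closed-form grid snap: each axis independently, no 15-step scan.
--     coord = [-1, -1]
--     for k in (0, 1):
--         i = (pos[k] - 85) // 30
--         if 0 <= i < 15:
--             coord[k] = i
--             pos[k] = 100 + 30 * i
--     return coord, pos
-- ===== Notes on version B (the rewrite author's own statement) =====
-- stated objective: simpler
-- what changed: Replaces A's fixed 15-iteration window scan over the board with a closed-form floor-division grid snap applied once to each of the two coordinates.
import Mathlib
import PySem

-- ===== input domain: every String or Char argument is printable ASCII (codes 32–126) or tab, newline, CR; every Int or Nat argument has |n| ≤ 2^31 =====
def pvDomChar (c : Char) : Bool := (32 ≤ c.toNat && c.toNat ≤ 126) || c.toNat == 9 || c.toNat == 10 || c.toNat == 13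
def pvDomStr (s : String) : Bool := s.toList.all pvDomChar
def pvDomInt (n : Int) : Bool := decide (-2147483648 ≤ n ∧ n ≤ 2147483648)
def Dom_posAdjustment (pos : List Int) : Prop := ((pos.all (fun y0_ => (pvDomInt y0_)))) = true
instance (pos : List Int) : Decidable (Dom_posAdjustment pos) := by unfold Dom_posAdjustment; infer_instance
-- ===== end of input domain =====

-- B replaces A's 15-iteration window scan with a per-axis closed-form floor-division grid snap
-- (objective: simpler).  Both A and B mutate `pos` in place identically; the ports model the
-- final value of `pos` in the returned pair.

-- ===== PORT A =====
-- one iteration of A's `for i in range(0, 15)` body (state = (coord, pos))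
def posAdjA_step (st : List Int × List Int) (i : Int) : List Int × List Int :=
  let p0 := (PySem.List.pyGet? st.2 0).getD 0
  let st1 := if p0 ≥ 100 + 30*i - 15 ∧ p0 < 100 + 30*i + 15
             then (st.1.set 0 i, st.2.set 0 (100 + 30*i)) else st
  let p1 := (PySem.List.pyGet? st1.2 1).getD 0
  if p1 ≥ 100 + 30*i - 15 ∧ p1 < 100 + 30*i + 15
  then (st1.1.set 1 i, st1.2.set 1 (100 + 30*i)) else st1

def posAdjustment (pos : List Int) : List Int × List Int :=
  (PySem.List.pyRange 0 15 1).foldl posAdjA_step ([-1, -1], pos)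

-- ===== PORT B =====
-- one iteration of B's `for k in (0, 1)` body
def posAdjB_step (st : List Int × List Int) (k : Nat) : List Int × List Int :=
  let v := (PySem.List.pyGet? st.2 (k : Int)).getD 0
  let i := PySem.Int.floordiv (v - 85) 30
  if 0 ≤ i ∧ i < 15 then (st.1.set k i, st.2.set k (100 + 30*i)) else st

def posAdjustment_alt (pos : List Int) : List Int × List Int :=
  [0, 1].foldl posAdjB_step ([-1, -1], pos)

-- ===== PRECONDITION & SPEC =====
-- Pre_ excludes only lists with fewer than 2 elements, on which the Python A raises IndexError
-- (B raises there too); on every list of length ≥ 2 both return.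
def Pre_posAdjustment (pos : List Int) : Prop := 2 ≤ pos.length
instance (pos : List Int) : Decidable (Pre_posAdjustment pos) := by unfold Pre_posAdjustment; infer_instance
def pvWitness_posAdjustment : List Int := [100, 203]

def Spec_posAdjustment (pos : List Int) (out : List Int × List Int) : Prop := out = posAdjustment_alt pos
instance (pos : List Int) (out : List Int × List Int) : Decidable (Spec_posAdjustment pos out) := by unfold Spec_posAdjustment; infer_instance

-- ===== CLAIM (what is proved, stated in full; the proofs are below) =====
def Claim_equal_posAdjustment : Prop := ∀ (pos : List Int), Dom_posAdjustment pos → Pre_posAdjustment pos → Spec_posAdjustment pos (posAdjustment pos)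

-- ===== LEMMAS AND PROOFS =====

-- scalar version of one iteration of A's loop body on one axis (state = (coord_k, pos_k))
def step1 (st : Int × Int) (i : Int) : Int × Int :=
  if st.2 ≥ 100 + 30*i - 15 ∧ st.2 < 100 + 30*i + 15 then (i, 100 + 30*i) else st

lemma stepA_eq (c0 c1 a b : Int) (rest : List Int) (i : Int) :
    posAdjA_step ([c0, c1], a :: b :: rest) i =
      ([(step1 (c0, a) i).1, (step1 (c1, b) i).1],
        (step1 (c0, a) i).2 :: (step1 (c1, b) i).2 :: rest) := by
  have g0 : ∀ (x y : Int) (r : List Int), (PySem.List.pyGet? (x::y::r) 0).getD 0 = x :=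
    fun x y r => by simp [pysem]
  simp only [posAdjA_step, step1, g0, List.set]
  split_ifs <;> simp_all [List.set]

lemma foldA_eq (l : List Int) (c0 c1 a b : Int) (rest : List Int) :
    l.foldl posAdjA_step ([c0, c1], a :: b :: rest) =
      ([(l.foldl step1 (c0, a)).1, (l.foldl step1 (c1, b)).1],
        (l.foldl step1 (c0, a)).2 :: (l.foldl step1 (c1, b)).2 :: rest) := by
  induction l generalizing c0 c1 a b with
  | nil => simp
  | cons x xs ih =>
      simp only [List.foldl_cons, stepA_eq]
      exact ih _ _ _ _

-- A's scan leaves the state unchanged when no visited window contains the value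
lemma run_id (l : List Int) (c v : Int)
    (h : ∀ i ∈ l, ¬(v ≥ 100 + 30*i - 15 ∧ v < 100 + 30*i + 15)) :
    l.foldl step1 (c, v) = (c, v) := by
  induction l with
  | nil => rfl
  | cons x xs ih =>
      simp only [List.foldl_cons, step1, if_neg (h x (by simp))]
      exact ih fun i hi => h i (by simp [hi])

-- closed form of A's 15-iteration scan on one axis
lemma fold1_closed (a : Int) :
    (PySem.List.pyRange 0 15 1).foldl step1 (-1, a) =
      (if 85 ≤ a ∧ a < 535 then ((a - 85) / 30, 100 + 30 * ((a - 85) / 30)) else (-1, a)) := by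
  by_cases h : 85 ≤ a ∧ a < 535
  · set j : Int := (a - 85) / 30 with hj
    have hj0 : 0 ≤ j ∧ j < 15 := by constructor <;> omega
    have h1 : List.foldl step1 (-1, a) (PySem.List.pyRange 0 j) = (-1, a) :=
      run_id _ _ _ (fun i hi => by have := PySem.List.mem_pyRange_one.mp hi; omega)
    have hfire : step1 (-1, a) j = (j, 100 + 30 * j) := by
      simp only [step1]; rw [if_pos (by constructor <;> omega)]
    have h2 : List.foldl step1 (j, 100 + 30 * j) (PySem.List.pyRange (j+1) 15) = (j, 100 + 30 * j) :=
      run_id _ _ _ (fun i hi => by have := PySem.List.mem_pyRange_one.mp hi; omega)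
    rw [if_pos h,
      PySem.List.pyRange_one_append 0 j 15 hj0.1 (by omega),
      List.foldl_append, h1,
      PySem.List.pyRange_one_cons (by omega : j < 15),
      List.foldl_cons, hfire, h2]
  · rw [if_neg h, run_id _ _ _ (fun i hi => by
      have := PySem.List.mem_pyRange_one.mp hi; omega)]

-- closed form of B on a list of length ≥ 2
lemma altB_closed (a b : Int) (rest : List Int) :
    posAdjustment_alt (a::b::rest) =
      ([(if 85 ≤ a ∧ a < 535 then (a-85)/30 else -1), (if 85 ≤ b ∧ b < 535 then (b-85)/30 else -1)],
       (if 85 ≤ a ∧ a < 535 then 100+30*((a-85)/30) else a)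
         :: (if 85 ≤ b ∧ b < 535 then 100+30*((b-85)/30) else b) :: rest) := by
  have g0 : ∀ (x y : Int) (r : List Int), (PySem.List.pyGet? (x::y::r) 0).getD 0 = x :=
    fun x y r => by simp [pysem]
  have hd : ∀ x : Int, PySem.Int.floordiv x 30 = x / 30 :=
    fun x => PySem.Int.floordiv_eq_ediv_of_pos (by norm_num)
  simp only [posAdjustment_alt, posAdjB_step, List.foldl_cons, List.foldl_nil,
    Nat.cast_zero, Nat.cast_one, hd, g0, List.set]
  split_ifs <;> simp_all [List.set] <;> omega

-- ===== VERDICT (by name: the statement is the Claim_ definition above) =====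
theorem posAdjustment_spec : Claim_equal_posAdjustment := by
  intro pos _ hpre
  unfold Spec_posAdjustment
  match pos, hpre with
  | a :: b :: rest, _ =>
    rw [altB_closed]
    unfold posAdjustment
    rw [foldA_eq, fold1_closed, fold1_closed]
    split_ifs <;> rfl
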